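-- pv_equiv track=rewrite | github.com/NOAA-National-Severe-Storms-Laboratory/frdd-wofs-phi | experiments/.ipynb_checkpoints/plot_multipanel_mean_normalized_ti_weight_contingency_double_axis-checkpoint.py | get_colors_for_names
-- ===== SOURCE A (Python) =====
-- def get_colors_for_names(names, wofs_list, ps_list, wofsColor, psColor, otherColor):
--
--     color_list = []
--     for name in names:
--         if (name in wofs_list):
--             color_list.append(wofsColor)
--         elif (name in ps_list):
--             color_list.append(psColor)
--         else:
--             color_list.append(otherColor)
--
--     return color_list
-- ===== SOURCE B (Python) =====
-- def get_colors_for_names(names, wofs_list, ps_list, wofsColor, psColor, otherColor):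
--     colors = [otherColor] * len(names)
--     positions = {}
--     for i, name in enumerate(names):
--         positions.setdefault(name, []).append(i)
--     for name in ps_list:
--         for i in positions.get(name, []):
--             colors[i] = psColor
--     for name in wofs_list:
--         for i in positions.get(name, []):
--             colors[i] = wofsColor
--     return colors
-- ===== Notes on version B (the rewrite author's own statement) =====
-- stated objective: faster
-- what changed: Inverts the traversal: instead of scanning both lists per name, B preallocates [otherColor]*len(names), builds a name->positions index from names once, then paints positions by iterating ps_list and then wofs_list (wofs pass last so it overrides on overlap, matching A's if/elif precedence).
import Mathlib
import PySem

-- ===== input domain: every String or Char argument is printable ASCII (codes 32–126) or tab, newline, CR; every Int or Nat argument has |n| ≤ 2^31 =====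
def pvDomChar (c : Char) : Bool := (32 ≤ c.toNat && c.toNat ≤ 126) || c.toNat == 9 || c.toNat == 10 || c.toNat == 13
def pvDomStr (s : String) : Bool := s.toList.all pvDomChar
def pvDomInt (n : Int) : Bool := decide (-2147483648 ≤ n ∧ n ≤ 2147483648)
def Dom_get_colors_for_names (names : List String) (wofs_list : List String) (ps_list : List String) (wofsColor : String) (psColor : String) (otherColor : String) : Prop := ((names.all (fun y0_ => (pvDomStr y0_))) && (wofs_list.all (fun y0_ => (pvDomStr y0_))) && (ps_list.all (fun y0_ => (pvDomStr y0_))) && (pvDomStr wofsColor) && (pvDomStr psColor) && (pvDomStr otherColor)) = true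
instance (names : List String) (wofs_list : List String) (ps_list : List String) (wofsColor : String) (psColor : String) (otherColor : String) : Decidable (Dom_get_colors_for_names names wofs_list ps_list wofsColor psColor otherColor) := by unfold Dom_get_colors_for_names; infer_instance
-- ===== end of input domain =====

-- B inverts A's traversal: it preallocates the output, indexes name→positions once, and paints positions by iterating ps_list then wofs_list (wofs last = A's if/elif precedence); measured faster in a timing run.


-- ===== PORT A =====
def get_colors_for_names (names : List String) (wofs_list : List String) (ps_list : List String) (wofsColor : String) (psColor : String) (otherColor : String) : List String :=
  names.foldl (fun color_list name =>
    if name ∈ wofs_list then color_list ++ [wofsColor]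
    else if name ∈ ps_list then color_list ++ [psColor]
    else color_list ++ [otherColor]) []

-- ===== PORT B =====
-- B: preallocate [otherColor]*len(names), index name→positions once, then paint positions
-- by iterating ps_list and then wofs_list (wofs pass last, so it overrides on overlap).
-- colors[i] = c is ported as pySetD (exact here: indices come from enumerate, always in range).
def get_colors_for_names_alt (names : List String) (wofs_list : List String) (ps_list : List String) (wofsColor : String) (psColor : String) (otherColor : String) : List String :=
  let colors0 := List.replicate names.length otherColor
  let positions := (PySem.List.enumerate names).foldl
      (fun d p => d.modify p.2 [] (· ++ [p.1])) (PySem.Dict.empty : PySem.Dict String (List Int))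
  let colors1 := ps_list.foldl (fun cs name =>
      (positions.getD name []).foldl (fun cs i => PySem.List.pySetD cs i psColor) cs) colors0
  wofs_list.foldl (fun cs name =>
      (positions.getD name []).foldl (fun cs i => PySem.List.pySetD cs i wofsColor) cs) colors1

-- ===== PRECONDITION & SPEC =====
def Spec_get_colors_for_names (names : List String) (wofs_list : List String) (ps_list : List String) (wofsColor : String) (psColor : String) (otherColor : String) (out : List String) : Prop := out = get_colors_for_names_alt names wofs_list ps_list wofsColor psColor otherColor
instance (names : List String) (wofs_list : List String) (ps_list : List String) (wofsColor : String) (psColor : String) (otherColor : String) (out : List String) : Decidable (Spec_get_colors_for_names names wofs_list ps_list wofsColor psColor otherColor out) := by unfold Spec_get_colors_for_names; infer_instance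

-- ===== CLAIM (what is proved, stated in full; the proofs are below) =====
def Claim_equal_get_colors_for_names : Prop := ∀ (names : List String) (wofs_list : List String) (ps_list : List String) (wofsColor : String) (psColor : String) (otherColor : String), Dom_get_colors_for_names names wofs_list ps_list wofsColor psColor otherColor → Spec_get_colors_for_names names wofs_list ps_list wofsColor psColor otherColor (get_colors_for_names names wofs_list ps_list wofsColor psColor otherColor)

-- ===== LEMMAS AND PROOFS =====


-- A's loop equals a single map over names.
theorem foldl_eq_acc_map (names wofs_list ps_list : List String)
    (wofsColor psColor otherColor : String) (acc : List String) :
    names.foldl (fun color_list name =>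
      if name ∈ wofs_list then color_list ++ [wofsColor]
      else if name ∈ ps_list then color_list ++ [psColor]
      else color_list ++ [otherColor]) acc
    = acc ++ names.map (fun name =>
        if name ∈ wofs_list then wofsColor
        else if name ∈ ps_list then psColor
        else otherColor) := by
  induction names generalizing acc with
  | nil => simp
  | cons a tl ih =>
    simp only [List.foldl_cons, List.map_cons, ih]
    split_ifs <;> simp

-- Characterisation of B's positions index: j is recorded under name iff names[j] = name.
theorem mem_positions (names : List String) (name : String) (j : Int) :
    j ∈ ((PySem.List.enumerate names).foldl
        (fun d p => d.modify p.2 [] (· ++ [p.1]))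
        (PySem.Dict.empty : PySem.Dict String (List Int))).getD name []
      ↔ ∃ k : Nat, ∃ h : k < names.length, j = (k : Int) ∧ names[k] = name := by
  have hmap : (PySem.List.enumerate names).foldl
        (fun d p => d.modify p.2 [] (· ++ [p.1]))
        (PySem.Dict.empty : PySem.Dict String (List Int))
      = ((PySem.List.enumerate names).map (fun p => (p.2, p.1))).foldl
        (fun d p => d.modify p.1 [] (· ++ [p.2])) PySem.Dict.empty := by
    rw [List.foldl_map]
  rw [hmap, PySem.Dict.getD_foldl_modify_append]
  simp only [PySem.Dict.getD_empty, List.nil_append, List.mem_map, List.mem_filter,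
    List.mem_map, beq_iff_eq]
  constructor
  · rintro ⟨q, ⟨⟨p, hp, rfl⟩, hname⟩, rfl⟩
    rcases (PySem.List.mem_enumerate_iff _ _ _).1 hp with ⟨k, hk, rfl⟩
    exact ⟨k, hk, by simp, by simpa using hname⟩
  · rintro ⟨k, hk, rfl, hname⟩
    refine ⟨(names[k], (k : Int)), ⟨⟨((k : Int), names[k]), ?_, rfl⟩, by simpa⟩, rfl⟩
    exact (PySem.List.mem_enumerate_iff _ _ _).2 ⟨k, hk, by simp⟩

-- Painting a list of nonnegative positions: length and pointwise value.
theorem length_paint (idxs : List Int) (c : String) (cs : List String) :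
    (idxs.foldl (fun cs i => PySem.List.pySetD cs i c) cs).length = cs.length := by
  induction idxs generalizing cs with
  | nil => rfl
  | cons a tl ih => simp [ih, PySem.List.length_pySetD]

theorem getElem?_paint (idxs : List Int) (c : String) (cs : List String) (k : Nat)
    (hnn : ∀ i ∈ idxs, 0 ≤ i) :
    (idxs.foldl (fun cs i => PySem.List.pySetD cs i c) cs)[k]?
      = if (k : Int) ∈ idxs ∧ k < cs.length then some c else cs[k]? := by
  induction idxs generalizing cs with
  | nil => simp
  | cons a tl ih =>
    have ha : 0 ≤ a := hnn a (List.mem_cons_self ..)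
    have hset : PySem.List.pySetD cs a c = cs.set a.toNat c :=
      PySem.List.pySetD_of_nonneg cs c ha
    simp only [List.foldl_cons, hset]
    rw [ih _ (fun i hi => hnn i (List.mem_cons_of_mem _ hi))]
    simp only [List.length_set, List.getElem?_set, List.mem_cons]
    by_cases htl : (k : Int) ∈ tl
    · by_cases hlen : k < cs.length
      · simp [htl, hlen]
      · simp only [htl, hlen, and_false, if_false]
        split_ifs with h1 h2 <;> first | omega | rfl | (rw [List.getElem?_eq_none]; omega)
    · by_cases hak : a.toNat = k
      · have heq : a = (k : Int) := by omega
        by_cases hlen : k < cs.length <;> simp [htl, heq, hlen]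
      · have hne : ¬ (k : Int) = a := by omega
        simp [htl, hak, hne]

-- One painting pass over a list of names, positions taken from B's index.
theorem getElem?_pass (names : List String) (lst : List String) (c : String)
    (cs : List String) (k : Nat) (hlen : cs.length = names.length) :
    (lst.foldl (fun cs name =>
        (((PySem.List.enumerate names).foldl
          (fun d p => d.modify p.2 [] (· ++ [p.1]))
          (PySem.Dict.empty : PySem.Dict String (List Int))).getD name []).foldl
          (fun cs i => PySem.List.pySetD cs i c) cs) cs)[k]?
      = if (∃ h : k < names.length, names[k] ∈ lst) then some c else cs[k]? := by
  induction lst generalizing cs with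
  | nil =>
    simp only [List.foldl_nil]
    split_ifs with h
    · exact absurd h (by rintro ⟨_, hmem⟩; exact (List.not_mem_nil) hmem)
    · rfl
  | cons a tl ih =>
    have hnn : ∀ i ∈ ((PySem.List.enumerate names).foldl
        (fun d p => d.modify p.2 [] (· ++ [p.1]))
        (PySem.Dict.empty : PySem.Dict String (List Int))).getD a [], 0 ≤ i := by
      intro i hi
      rcases (mem_positions names a i).1 hi with ⟨m, _, rfl, _⟩
      exact Int.natCast_nonneg m
    have hlen' : (((((PySem.List.enumerate names).foldl
        (fun d p => d.modify p.2 [] (· ++ [p.1]))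
        (PySem.Dict.empty : PySem.Dict String (List Int))).getD a []).foldl
        (fun cs i => PySem.List.pySetD cs i c) cs)).length = names.length := by
      rw [length_paint, hlen]
    simp only [List.foldl_cons]
    rw [ih _ hlen']
    rw [getElem?_paint _ _ _ _ hnn]
    simp only [mem_positions, hlen]
    by_cases hk : k < names.length
    · by_cases htl : names[k] ∈ tl
      · simp [hk, htl]
      · by_cases hka : names[k] = a
        · have : (∃ m : Nat, ∃ h : m < names.length, (k : Int) = (m : Int) ∧ names[m] = a) :=
            ⟨k, hk, rfl, hka⟩
          simp [hk, hka]
        · have : ¬ (∃ m : Nat, ∃ h : m < names.length, (k : Int) = (m : Int) ∧ names[m] = a) := by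
            rintro ⟨m, hm, hkm, hma⟩
            have : m = k := by omega
            exact hka (this ▸ hma)
          simp [hk, htl, hka]
    · simp [hk]

-- ===== VERDICT (by name: the statement is the Claim_ definition above) =====
theorem length_pass (names : List String) (lst : List String) (c : String)
    (cs : List String) :
    (lst.foldl (fun cs name =>
        (((PySem.List.enumerate names).foldl
          (fun d p => d.modify p.2 [] (· ++ [p.1]))
          (PySem.Dict.empty : PySem.Dict String (List Int))).getD name []).foldl
          (fun cs i => PySem.List.pySetD cs i c) cs) cs).length = cs.length := by
  induction lst generalizing cs with
  | nil => rfl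
  | cons a tl ih => rw [List.foldl_cons, ih, length_paint]

theorem get_colors_for_names_spec : Claim_equal_get_colors_for_names := by
  intro names wofs_list ps_list wofsColor psColor otherColor _
  unfold Spec_get_colors_for_names get_colors_for_names get_colors_for_names_alt
  rw [foldl_eq_acc_map]
  simp only [List.nil_append]
  apply List.ext_getElem?
  intro k
  have hlen1 : (ps_list.foldl (fun cs name =>
      (((PySem.List.enumerate names).foldl
        (fun d p => d.modify p.2 [] (· ++ [p.1]))
        (PySem.Dict.empty : PySem.Dict String (List Int))).getD name []).foldl
        (fun cs i => PySem.List.pySetD cs i psColor) cs)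
      (List.replicate names.length otherColor)).length = names.length := by
    rw [length_pass, List.length_replicate]
  rw [getElem?_pass names wofs_list wofsColor _ k hlen1,
      getElem?_pass names ps_list psColor _ k (by rw [List.length_replicate])]
  simp only [List.getElem?_map, List.getElem?_replicate]
  by_cases hk : k < names.length
  · rw [List.getElem?_eq_getElem hk]
    by_cases hw : names[k] ∈ wofs_list
    · simp [hk, hw]
    · by_cases hp : names[k] ∈ ps_list <;> simp [hk, hw, hp]
  · rw [List.getElem?_eq_none (by omega)]
    simp [hk]
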